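-- pv_equiv track=rewrite | github.com/seriaati/hb-data | hb_data/common/dict_utils.py | merge_dicts_by_different_keys
-- ===== SOURCE A (Python) =====
-- def merge_dicts_by_different_keys(dicts: dict[str, list[dict]]) -> list[dict]:
--     (first_key, first_list), *rest = dicts.items()
--
--     result = list(first_list)
--     for key, lst in rest:
--         index = {item[key]: item for item in lst}
--         merged = []
--         for item in result:
--             match = index.get(item[first_key])
--             if match:
--                 merged.append({**item, **match})
--         result = merged
--
--     return result
-- ===== SOURCE B (Python) =====
-- def merge_dicts_by_different_keys(dicts: dict[str, list[dict]]) -> list[dict]: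
--     (first_key, first_list), *rest = dicts.items()
--
--     indexes = [{item[key]: item for item in lst} for key, lst in rest]
--
--     out = []
--     for row in first_list:
--         cur = dict(row)
--         alive = True
--         for idx in indexes:
--             match = idx.get(cur[first_key])
--             if not match:
--                 alive = False
--                 break
--             cur = {**cur, **match}
--         if alive:
--             out.append(cur)
--     return out
-- ===== Notes on version B (the rewrite author's own statement) =====
-- stated objective: alternative
-- what changed: B precomputes all join indexes once and then makes a single row-major pass over the first list, carrying each row through the whole index chain (with early break on a miss), instead of A's pass-major loop that rebuilds the entire intermediate result list for every key.
import Mathlib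
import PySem

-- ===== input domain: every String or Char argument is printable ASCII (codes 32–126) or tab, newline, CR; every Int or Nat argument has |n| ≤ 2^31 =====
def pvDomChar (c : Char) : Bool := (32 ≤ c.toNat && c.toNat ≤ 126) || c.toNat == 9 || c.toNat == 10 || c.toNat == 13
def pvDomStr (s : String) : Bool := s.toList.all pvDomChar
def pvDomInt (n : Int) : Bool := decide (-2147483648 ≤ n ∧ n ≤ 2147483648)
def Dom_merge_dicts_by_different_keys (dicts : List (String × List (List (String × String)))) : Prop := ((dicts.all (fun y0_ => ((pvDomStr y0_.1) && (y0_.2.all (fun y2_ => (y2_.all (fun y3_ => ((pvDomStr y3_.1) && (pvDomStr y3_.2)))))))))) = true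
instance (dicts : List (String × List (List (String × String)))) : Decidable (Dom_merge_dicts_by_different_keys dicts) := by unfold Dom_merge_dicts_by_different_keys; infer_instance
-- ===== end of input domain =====

-- B change (objective: alternative): row-major single pass over the first list with all join
-- indexes built once up front, instead of A's pass-major repeated rebuilding of the result list.

-- shared leaf helpers (identical subexpressions in both Pythons: item[k], {**cur,**m},
-- and the dict comprehension {item[key]: item for item in lst})
def pvGet (item : List (String × String)) (k : String) : String :=
  (PySem.Dict.mk item).getD k ""

def pvUpd (cur m : List (String × String)) : List (String × String) :=
  (m.foldl (fun d kv => d.insert kv.1 kv.2) (PySem.Dict.mk cur)).items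

def pvIndex (key : String) (lst : List (List (String × String))) : PySem.Dict String (List (String × String)) :=
  lst.foldl (fun d item => d.insert (pvGet item key) item) PySem.Dict.empty

-- ===== PORT A =====
def merge_dicts_by_different_keys (dicts : List (String × List (List (String × String)))) : List (List (String × String)) :=
  match dicts with
  | [] => []  -- Python raises ValueError here; excluded by Pre_
  | (first_key, first_list) :: rest =>
    rest.foldl (fun result kl =>
      let index := pvIndex kl.1 kl.2
      result.foldl (fun merged item =>
        let m := (index.get? (pvGet item first_key)).getD []
        if m.isEmpty then merged else merged ++ [pvUpd item m]) []) first_list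

-- ===== PORT B =====
def pvApply (fk : String) : List (PySem.Dict String (List (String × String))) → List (String × String) → Option (List (String × String))
  | [], cur => some cur
  | idx :: idxs, cur =>
    let m := (idx.get? (pvGet cur fk)).getD []
    if m.isEmpty then none else pvApply fk idxs (pvUpd cur m)

def merge_dicts_by_different_keys_alt (dicts : List (String × List (List (String × String)))) : List (List (String × String)) :=
  match dicts with
  | [] => []  -- Python raises ValueError here; excluded by Pre_
  | (fk, fl) :: rest =>
    let indexes := rest.map (fun kl => pvIndex kl.1 kl.2)
    fl.foldl (fun out row =>
      match pvApply fk indexes row with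
      | some cur => out ++ [cur]
      | none => out) []

-- ===== PRECONDITION & SPEC =====
-- Pre_ excludes exactly the inputs on which Python A raises: the empty dict (ValueError on
-- unpacking) and KeyError cases — an item of a non-first list missing that list's key, or
-- (when there is more than one list) a row of the first list missing the first key.
def Pre_merge_dicts_by_different_keys (dicts : List (String × List (List (String × String)))) : Prop :=
  dicts ≠ [] ∧
  (∀ kl ∈ dicts.tail, ∀ item ∈ kl.2, kl.1 ∈ item.map Prod.fst) ∧
  (dicts.tail ≠ [] → ∀ row ∈ (dicts.headD ("", [])).2, (dicts.headD ("", [])).1 ∈ row.map Prod.fst)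
instance (dicts : List (String × List (List (String × String)))) : Decidable (Pre_merge_dicts_by_different_keys dicts) := by unfold Pre_merge_dicts_by_different_keys; infer_instance

def pvWitness_merge_dicts_by_different_keys : (List (String × List (List (String × String)))) :=
  [("a", [[("a", "1"), ("x", "y")], [("a", "2")]]), ("b", [[("b", "1"), ("z", "w")]])]

def Spec_merge_dicts_by_different_keys (dicts : List (String × List (List (String × String)))) (out : List (List (String × String))) : Prop := out = merge_dicts_by_different_keys_alt dicts
instance (dicts : List (String × List (List (String × String)))) (out : List (List (String × String))) : Decidable (Spec_merge_dicts_by_different_keys dicts out) := by unfold Spec_merge_dicts_by_different_keys; infer_instance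

-- ===== CLAIM (what is proved, stated in full; the proofs are below) =====
def Claim_equal_merge_dicts_by_different_keys : Prop := ∀ (dicts : List (String × List (List (String × String)))), Dom_merge_dicts_by_different_keys dicts → Pre_merge_dicts_by_different_keys dicts → Spec_merge_dicts_by_different_keys dicts (merge_dicts_by_different_keys dicts)

-- ===== LEMMAS AND PROOFS =====

-- one filtering pass of A, as an Option-valued step (none = row dropped)
def pvStep (fk : String) (idx : PySem.Dict String (List (String × String))) (item : List (String × String)) : Option (List (String × String)) :=
  let m := (idx.get? (pvGet item fk)).getD []
  if m.isEmpty then none else some (pvUpd item m)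

-- an append-only foldl collecting the some-results of an Option-valued step IS filterMap
lemma pv_foldl_opt {α β : Type} (f : α → Option β) (g : List β → α → List β)
    (hg : ∀ out x, g out x = match f x with | some y => out ++ [y] | none => out) :
    ∀ (l : List α) (acc : List β), l.foldl g acc = acc ++ l.filterMap f := by
  intro l
  induction l with
  | nil => intro acc; simp
  | cons x xs ih =>
    intro acc
    rw [List.foldl_cons, hg, List.filterMap_cons]
    cases h : f x <;> simp [ih]

-- A's inner loop over the current result list is one filterMap by pvStep
lemma pv_inner_loop (fk : String) (idx : PySem.Dict String (List (String × String)))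
    (l : List (List (String × String))) (acc : List (List (String × String))) :
      l.foldl (fun merged item =>
          let m := (idx.get? (pvGet item fk)).getD []
          if m.isEmpty then merged else merged ++ [pvUpd item m]) acc
        = acc ++ l.filterMap (pvStep fk idx) := by
  refine pv_foldl_opt (pvStep fk idx) _ ?_ l acc
  intro out x
  simp only [pvStep]
  by_cases h : ((idx.get? (pvGet x fk)).getD []).isEmpty <;> simp [h]

-- composing B's per-row chain equals bind of one step with the rest of the chain
lemma pvApply_cons (fk : String) (idx : PySem.Dict String (List (String × String)))
    (idxs : List (PySem.Dict String (List (String × String)))) (r : List (String × String)) :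
    pvApply fk (idx :: idxs) r = (pvStep fk idx r).bind (pvApply fk idxs) := by
  simp only [pvApply, pvStep]
  split <;> simp

-- folding A's passes over the index list equals one filterMap by B's chained step
lemma pv_passes_eq_chain (fk : String) :
    ∀ (idxs : List (PySem.Dict String (List (String × String)))) (rows : List (List (String × String))),
      idxs.foldl (fun rows idx => rows.filterMap (pvStep fk idx)) rows
        = rows.filterMap (pvApply fk idxs) := by
  intro idxs
  induction idxs with
  | nil => intro rows; simp [pvApply]
  | cons idx idxs ih =>
    intro rows
    simp only [List.foldl_cons]
    rw [ih, List.filterMap_filterMap]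
    apply List.filterMap_congr
    intro r _
    rw [pvApply_cons]

-- ===== VERDICT (by name: the statement is the Claim_ definition above) =====
set_option maxHeartbeats 2000000 in
theorem merge_dicts_by_different_keys_spec : Claim_equal_merge_dicts_by_different_keys := by
  intro dicts _ _
  unfold Spec_merge_dicts_by_different_keys
  cases dicts with
  | nil => rfl
  | cons hd rest =>
    obtain ⟨fk, fl⟩ := hd
    have hA : merge_dicts_by_different_keys ((fk, fl) :: rest)
        = (rest.map fun kl => pvIndex kl.1 kl.2).foldl
            (fun rows idx => rows.filterMap (pvStep fk idx)) fl := by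
      simp only [merge_dicts_by_different_keys]
      rw [List.foldl_map]
      apply List.foldl_ext
      intro rows kl _
      simpa using pv_inner_loop fk (pvIndex kl.1 kl.2) rows []
    have hB : merge_dicts_by_different_keys_alt ((fk, fl) :: rest)
        = fl.filterMap (pvApply fk (rest.map fun kl => pvIndex kl.1 kl.2)) := by
      simp only [merge_dicts_by_different_keys_alt]
      refine Eq.trans
        (pv_foldl_opt (pvApply fk (rest.map fun kl => pvIndex kl.1 kl.2)) _ ?_ fl [])
        (List.nil_append _)
      intro out row
      cases h : pvApply fk (rest.map fun kl => pvIndex kl.1 kl.2) row <;> simp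
    rw [hA, hB, pv_passes_eq_chain]
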